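-- pv_equiv track=rewrite | github.com/WesleyTianY/BondVis | backend2/services/chain_project/path_linking.py | merge_subsequences
-- ===== SOURCE A (Python) =====
-- def merge_subsequences(subsequences):
--     # 过滤掉长度小于3的链路
--     subsequences = [seq for seq in subsequences if len(seq[0]) >= 3]
--
--     # 按长度从长到短排序
--     subsequences.sort(key=lambda x: len(x[0]), reverse=True)
--
--     merged = []
--     used = [False] * len(subsequences)
--
--     for i, (subseq_i, count_i) in enumerate(subsequences):
--         if used[i]:
--             continue
--         # 当前链路是否需要合并
--         for j, (subseq_j, count_j) in enumerate(subsequences):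
--             if i != j and not used[j]:
--                 # 检查subseq_i是否是subseq_j的子集
--                 if len(subseq_i) < len(subseq_j) and subseq_i == subseq_j[:len(subseq_i)]:
--                     count_i += count_j
--                     used[j] = True
--         merged.append((subseq_i, count_i))
--
--     return merged
-- ===== SOURCE B (Python) =====
-- def merge_subsequences(subsequences):
--     # Different algorithm: instead of the quadratic scan over all pairs with a
--     # mutable `used` array, index the (filtered, length-sorted) sequences by a
--     # hash map of first occurrences, and find each sequence's receiver directly
--     # as the first occurrence of its longest proper prefix whose length occurs.
--     seqs = sorted([p for p in subsequences if len(p[0]) >= 3],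
--                   key=lambda p: len(p[0]), reverse=True)
--     first_pos = {}
--     for pos, (s, _) in enumerate(seqs):
--         first_pos.setdefault(tuple(s), pos)
--     lengths = sorted({len(s) for s, _ in seqs}, reverse=True)
--     extra = [0] * len(seqs)
--     for s, c in seqs:
--         for L in lengths:
--             if L < len(s):
--                 pos = first_pos.get(tuple(s[:L]))
--                 if pos is not None:
--                     extra[pos] += c
--                     break
--     return [(s, c + e) for (s, c), e in zip(seqs, extra)]
-- ===== Notes on version B (the rewrite author's own statement) =====
-- stated objective: faster
-- what changed: A's nested scan over all pairs with a mutable used-array is replaced by a hash index of first occurrences; each sequence's counts receiver is found directly as the first occurrence of its longest proper prefix present, then counts are aggregated in one pass.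
import Mathlib
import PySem

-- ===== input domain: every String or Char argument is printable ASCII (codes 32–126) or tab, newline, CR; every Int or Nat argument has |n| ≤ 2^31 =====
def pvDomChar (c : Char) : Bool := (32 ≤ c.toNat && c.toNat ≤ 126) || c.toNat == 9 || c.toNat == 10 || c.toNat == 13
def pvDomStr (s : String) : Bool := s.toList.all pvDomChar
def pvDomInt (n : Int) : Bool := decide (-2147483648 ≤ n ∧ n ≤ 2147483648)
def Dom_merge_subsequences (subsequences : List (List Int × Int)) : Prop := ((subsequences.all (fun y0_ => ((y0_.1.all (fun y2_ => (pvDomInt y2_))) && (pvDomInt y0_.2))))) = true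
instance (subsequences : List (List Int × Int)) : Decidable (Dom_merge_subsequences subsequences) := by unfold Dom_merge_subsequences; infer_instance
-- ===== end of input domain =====

-- B replaces A's quadratic all-pairs scan (with a mutable `used` array) by a hash index of
-- first occurrences, reading off each sequence's receiver as its longest proper prefix present.

-- ===== PORT A =====
def merge_subsequences (subsequences : List (List Int × Int)) : List (List Int × Int) :=
  -- subsequences = [seq for seq in subsequences if len(seq[0]) >= 3]
  let subsequences := subsequences.filter (fun seq => decide (3 ≤ seq.1.length))
  -- subsequences.sort(key=lambda x: len(x[0]), reverse=True)
  let subsequences := PySem.List.sorted subsequences (fun x => (x.1.length : Int)) true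
  -- merged = []; used = [False] * len(subsequences)
  let st := (PySem.List.enumerate subsequences 0).foldl (fun st ip =>
      let merged := st.1
      let used := st.2
      let i := ip.1
      let subseq_i := ip.2.1
      let count_i := ip.2.2
      if PySem.List.pyGetD used i false then st
      else
        let inner := (PySem.List.enumerate subsequences 0).foldl (fun st2 jp =>
            let count_i := st2.1
            let used := st2.2
            let j := jp.1
            let subseq_j := jp.2.1
            let count_j := jp.2.2
            if i ≠ j ∧ PySem.List.pyGetD used j false = false then
              if subseq_i.length < subseq_j.length ∧
                  subseq_i = PySem.List.slice subseq_j none (some (subseq_i.length : Int)) then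
                (count_i + count_j, PySem.List.pySetD used j true)
              else st2
            else st2) (count_i, used)
        (merged ++ [(subseq_i, inner.1)], inner.2))
    (([] : List (List Int × Int)), List.replicate subsequences.length false)
  st.1

-- ===== PORT B =====
-- for L in lengths: if L < len(s): pos = first_pos.get(tuple(s[:L])); if pos is not None: … break
def pvFindRecv (first_pos : PySem.Dict (List Int) Int) (s : List Int) : List Int → Option Int
  | [] => none
  | L :: rest =>
    if L < (s.length : Int) then
      match first_pos.get? (PySem.List.slice s none (some L)) with
      | some pos => some pos
      | none => pvFindRecv first_pos s rest
    else pvFindRecv first_pos s rest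

def merge_subsequences_alt (subsequences : List (List Int × Int)) : List (List Int × Int) :=
  let seqs := PySem.List.sorted (subsequences.filter (fun p => decide (3 ≤ p.1.length)))
      (fun p => (p.1.length : Int)) true
  -- first_pos = {}; for pos, (s, _) in enumerate(seqs): first_pos.setdefault(tuple(s), pos)
  let first_pos := (PySem.List.enumerate seqs 0).foldl
      (fun (d : PySem.Dict (List Int) Int) pp => d.setdefault pp.2.1 pp.1) PySem.Dict.empty
  -- lengths = sorted({len(s) for s, _ in seqs}, reverse=True)
  let lengths := PySem.List.sorted
      (PySem.Set.ofList (seqs.map (fun p => (p.1.length : Int)))) (fun x => x) true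
  -- extra = [0]*len(seqs); for s, c in seqs: … extra[pos] += c … (break)
  let extra := seqs.foldl (fun (extra : List Int) sc =>
      match pvFindRecv first_pos sc.1 lengths with
      | some pos => PySem.List.pySetD extra pos (PySem.List.pyGetD extra pos 0 + sc.2)
      | none => extra)
    (List.replicate seqs.length (0 : Int))
  -- return [(s, c + e) for (s, c), e in zip(seqs, extra)]
  (seqs.zip extra).map (fun p => (p.1.1, p.1.2 + p.2))

-- ===== PRECONDITION & SPEC =====
def Spec_merge_subsequences (subsequences : List (List Int × Int)) (out : List (List Int × Int)) : Prop := out = merge_subsequences_alt subsequences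
instance (subsequences : List (List Int × Int)) (out : List (List Int × Int)) : Decidable (Spec_merge_subsequences subsequences out) := by unfold Spec_merge_subsequences; infer_instance

-- ===== CLAIM (what is proved, stated in full; the proofs are below) =====
def Claim_equal_merge_subsequences : Prop := ∀ (subsequences : List (List Int × Int)), Dom_merge_subsequences subsequences → Spec_merge_subsequences subsequences (merge_subsequences subsequences)

-- ===== LEMMAS AND PROOFS =====

-- the filtered, length-sorted working list both programs build
def pvSS (subsequences : List (List Int × Int)) : List (List Int × Int) :=
  PySem.List.sorted (subsequences.filter (fun seq => decide (3 ≤ seq.1.length)))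
    (fun x => (x.1.length : Int)) true

def pvD : List Int × Int := ([], 0)
def pvSeq (ss : List (List Int × Int)) (i : Nat) : List Int := (ss.getD i pvD).1
def pvCnt (ss : List (List Int × Int)) (i : Nat) : Int := (ss.getD i pvD).2

-- "q can receive s's count": q is a strict prefix of s
def pvPred (s : List Int) (q : List Int × Int) : Bool :=
  decide (q.1.length < s.length ∧ q.1 = s.take q.1.length)

-- the receiver of s's count: the first position holding a strict prefix of s
def pvRecvN (ss : List (List Int × Int)) (s : List Int) : Option Nat := ss.findIdx? (pvPred s)

-- total extra received by position i from the first m donors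
def pvPart (ss : List (List Int × Int)) (i m : Nat) : Int :=
  (((List.range m).filter (fun j => pvRecvN ss (pvSeq ss j) == some i)).map (pvCnt ss)).sum

def pvXS (ss : List (List Int × Int)) (i : Nat) : Int := pvPart ss i ss.length

-- A's `used` array after outer step k has run its inner loop over the first m donors
def pvUsedAt (ss : List (List Int × Int)) (k m : Nat) : List Bool :=
  (List.range ss.length).map (fun j =>
    match pvRecvN ss (pvSeq ss j) with
    | some i' => decide (i' < k ∨ (i' = k ∧ j < m))
    | none => false)

def pvMergedAt (ss : List (List Int × Int)) (k : Nat) : List (List Int × Int) :=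
  (List.range k).map (fun i => (pvSeq ss i, pvCnt ss i + pvXS ss i))

def pvExtraAt (ss : List (List Int × Int)) (m : Nat) : List Int :=
  (List.range ss.length).map (fun i => pvPart ss i m)

-- zeta-reduced loop bodies of port A
def pvInnerF (i : Int) (subseq_i : List Int) (st2 : Int × List Bool)
    (jp : Int × (List Int × Int)) : Int × List Bool :=
  if i ≠ jp.1 ∧ PySem.List.pyGetD st2.2 jp.1 false = false then
    if subseq_i.length < jp.2.1.length ∧
        subseq_i = PySem.List.slice jp.2.1 none (some (subseq_i.length : Int)) then
      (st2.1 + jp.2.2, PySem.List.pySetD st2.2 jp.1 true)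
    else st2
  else st2

def pvOuterF (ss2 : List (List Int × Int)) (st : List (List Int × Int) × List Bool)
    (ip : Int × (List Int × Int)) : List (List Int × Int) × List Bool :=
  if PySem.List.pyGetD st.2 ip.1 false then st
  else
    let inner := (PySem.List.enumerate ss2 0).foldl (pvInnerF ip.1 ip.2.1) (ip.2.2, st.2)
    (st.1 ++ [(ip.2.1, inner.1)], inner.2)

-- the descending list of distinct lengths port B scans
def pvLens (ss : List (List Int × Int)) : List Int :=
  PySem.List.sorted (PySem.Set.ofList (ss.map (fun p => (p.1.length : Int)))) (fun x => x) true

-- zeta-reduced loop bodies of port B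
def pvSetdF (d : PySem.Dict (List Int) Int) (pp : Int × (List Int × Int)) :
    PySem.Dict (List Int) Int := d.setdefault pp.2.1 pp.1

def pvFP (ss : List (List Int × Int)) : PySem.Dict (List Int) Int :=
  (PySem.List.enumerate ss 0).foldl pvSetdF PySem.Dict.empty

def pvExtraF (fp : PySem.Dict (List Int) Int) (lengths : List Int) (extra : List Int)
    (sc : List Int × Int) : List Int :=
  match pvFindRecv fp sc.1 lengths with
  | some pos => PySem.List.pySetD extra pos (PySem.List.pyGetD extra pos 0 + sc.2)
  | none => extra

-- the two hypotheses about the working list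
def pvSorted (ss : List (List Int × Int)) : Prop :=
  ∀ i j : Nat, i ≤ j → j < ss.length → (pvSeq ss j).length ≤ (pvSeq ss i).length
def pvLen3 (ss : List (List Int × Int)) : Prop :=
  ∀ i : Nat, i < ss.length → 3 ≤ (pvSeq ss i).length

lemma pvSS_sorted (xs : List (List Int × Int)) : pvSorted (pvSS xs) := by
  intro i j hij hj
  rcases Nat.lt_or_eq_of_le hij with hlt | rfl
  · have hp := PySem.List.sorted_pairwise_rev
      (xs := xs.filter (fun seq => decide (3 ≤ seq.1.length)))
      (key := fun x => (x.1.length : Int))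
    rw [List.pairwise_iff_getElem] at hp
    have hi : i < (pvSS xs).length := Nat.lt_trans hlt hj
    have h2 := hp i j hi hj hlt
    simp only [pvSeq, pvSS] at h2 hi hj ⊢
    rw [List.getD_eq_getElem _ _ hi, List.getD_eq_getElem _ _ hj]
    exact_mod_cast h2
  · exact le_refl _

lemma pvSS_len3 (xs : List (List Int × Int)) : pvLen3 (pvSS xs) := by
  intro i hi
  have hmem : (pvSS xs)[i] ∈ pvSS xs := List.getElem_mem hi
  simp only [pvSS, PySem.List.mem_sorted] at hmem
  have := List.of_mem_filter hmem
  simp only [decide_eq_true_eq] at this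
  simp only [pvSeq]
  rw [List.getD_eq_getElem _ _ hi]
  simpa [pvSS] using this

-- bridges: the ports are (by zeta/delta) these folds over pvSS
lemma A_bridge (xs : List (List Int × Int)) :
    merge_subsequences xs =
      ((PySem.List.enumerate (pvSS xs) 0).foldl (pvOuterF (pvSS xs))
        (([] : List (List Int × Int)), List.replicate (pvSS xs).length false)).1 := rfl

lemma B_bridge (xs : List (List Int × Int)) :
    merge_subsequences_alt xs =
      ((pvSS xs).zip ((pvSS xs).foldl (pvExtraF (pvFP (pvSS xs)) (pvLens (pvSS xs)))
          (List.replicate (pvSS xs).length (0 : Int)))).map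
        (fun p => (p.1.1, p.1.2 + p.2)) := rfl

-- receiver characterisation
lemma recv_some_iff (ss : List (List Int × Int)) (s : List Int) (i : Nat) :
    pvRecvN ss s = some i ↔
      ∃ h : i < ss.length, pvPred s ss[i] = true ∧ ∀ t (ht : t < i), ¬ pvPred s (ss[t]'(Nat.lt_trans ht h)) = true := by
  simpa [pvRecvN] using List.findIdx?_eq_some_iff_getElem

lemma recv_none_iff (ss : List (List Int × Int)) (s : List Int) :
    pvRecvN ss s = none ↔ ∀ q ∈ ss, ¬ pvPred s q = true := by
  simp [pvRecvN, List.findIdx?_eq_none_iff]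

-- A side ------------------------------------------------------------------

lemma usedAt_get (ss : List (List Int × Int)) (k m j : Nat) (hj : j < ss.length) :
    (pvUsedAt ss k m).getD j false =
      (match pvRecvN ss (pvSeq ss j) with
       | some i' => decide (i' < k ∨ (i' = k ∧ j < m))
       | none => false) := by
  have hj' : j < (pvUsedAt ss k m).length := by simp [pvUsedAt, hj]
  rw [List.getD_eq_getElem _ _ hj']
  simp [pvUsedAt]

-- if pvPred (pvSeq ss j) holds at position i then i cannot come (weakly) before j
lemma pred_not_le (ss : List (List Int × Int)) (hs : pvSorted ss) {i j : Nat}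
    (hj : j < ss.length) (hij : i ≤ j) : ¬ pvPred (pvSeq ss j) (ss[i]'(Nat.lt_of_le_of_lt hij hj)) = true := by
  intro hpred
  have hi : i < ss.length := Nat.lt_of_le_of_lt hij hj
  rw [pvPred, decide_eq_true_eq] at hpred
  have h1 : pvSeq ss i = (ss[i]'hi).1 := by
    simp only [pvSeq]; rw [List.getD_eq_getElem _ _ hi]
  rw [← h1] at hpred
  have h2 := hs i j hij hj
  omega

lemma usedAt_self (ss : List (List Int × Int)) (hs : pvSorted ss) (k : Nat) (hk : k < ss.length) :
    (pvUsedAt ss k 0).getD k false = false := by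
  rw [usedAt_get ss k 0 k hk]
  cases hr : pvRecvN ss (pvSeq ss k) with
  | none => rfl
  | some i' =>
    simp only [decide_eq_false_iff_not]
    rintro (hlt | ⟨rfl, h0⟩)
    · rw [recv_some_iff] at hr
      obtain ⟨hin, hpred, -⟩ := hr
      exact pred_not_le ss hs hk (Nat.le_of_lt hlt) hpred
    · exact absurd h0 (by omega)

lemma seq_eq (ss : List (List Int × Int)) {i : Nat} (hi : i < ss.length) :
    pvSeq ss i = (ss[i]'hi).1 := by
  simp only [pvSeq]; rw [List.getD_eq_getElem _ _ hi]

lemma cnt_eq (ss : List (List Int × Int)) {i : Nat} (hi : i < ss.length) :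
    pvCnt ss i = (ss[i]'hi).2 := by
  simp only [pvCnt]; rw [List.getD_eq_getElem _ _ hi]

lemma recv_le (ss : List (List Int × Int)) {s : List Int} {i t : Nat}
    (hr : pvRecvN ss s = some i) (h : t < ss.length) (ht : pvPred s (ss[t]'h) = true) : i ≤ t := by
  rw [recv_some_iff] at hr
  obtain ⟨hin, -, hmin⟩ := hr
  by_contra hlt
  exact hmin t (by omega) ht

lemma pvPart_succ (ss : List (List Int × Int)) (i m : Nat) :
    pvPart ss i (m + 1) =
      pvPart ss i m + (if pvRecvN ss (pvSeq ss m) = some i then pvCnt ss m else 0) := by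
  simp only [pvPart, List.range_succ, List.filter_append, List.map_append, List.sum_append,
    List.filter_singleton]
  by_cases h : pvRecvN ss (pvSeq ss m) = some i
  · simp [h]
  · have hb : (pvRecvN ss (pvSeq ss m) == some i) = false := by
      simpa using h
    rw [hb]
    simp only [cond_false, List.map_nil, List.sum_nil]
    rw [if_neg h, add_zero]

lemma usedAt_succ_eq (ss : List (List Int × Int)) (k m : Nat)
    (h : ¬ pvRecvN ss (pvSeq ss m) = some k) :
    pvUsedAt ss k (m + 1) = pvUsedAt ss k m := by
  simp only [pvUsedAt]
  refine List.map_congr_left (fun j hj => ?_)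
  cases hr : pvRecvN ss (pvSeq ss j) with
  | none => rfl
  | some i' =>
    simp only []
    congr 1
    by_cases hjm : j = m
    · subst hjm
      rw [hr] at h
      have : i' ≠ k := fun he => h (by rw [he])
      simp only [eq_iff_iff]
      constructor <;> rintro (h1 | h2)
      · exact Or.inl h1
      · exact absurd h2.1 this
      · exact Or.inl h1
      · exact absurd h2.1 this
    · simp only [eq_iff_iff]
      constructor <;> rintro (h1 | h2)
      · exact Or.inl h1
      · exact Or.inr ⟨h2.1, by omega⟩
      · exact Or.inl h1
      · exact Or.inr ⟨h2.1, by omega⟩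

lemma usedAt_set (ss : List (List Int × Int)) (k m : Nat)
    (h : pvRecvN ss (pvSeq ss m) = some k) :
    pvUsedAt ss k (m + 1) = (pvUsedAt ss k m).set m true := by
  apply List.ext_getElem
  · simp [pvUsedAt]
  · intro j hj1 hj2
    have hjn : j < ss.length := by simpa [pvUsedAt] using hj1
    rw [List.getElem_set]
    simp only [pvUsedAt, List.getElem_map, List.getElem_range]
    by_cases hjm : m = j
    · subst hjm
      simp only [h]
      simp
    · rw [if_neg hjm]
      cases hr : pvRecvN ss (pvSeq ss j) with
      | none => rfl
      | some i' =>
        simp only []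
        congr 1
        simp only [eq_iff_iff]
        constructor <;> rintro (h1 | h2)
        · exact Or.inl h1
        · exact Or.inr ⟨h2.1, by omega⟩
        · exact Or.inl h1
        · exact Or.inr ⟨h2.1, by omega⟩

lemma cond2_iff (ss : List (List Int × Int)) (k m : Nat) (hk : k < ss.length)
    (hm : m < ss.length) :
    ((pvSeq ss k).length < (ss[m]'hm).1.length ∧
        pvSeq ss k = PySem.List.slice (ss[m]'hm).1 none (some ((pvSeq ss k).length : Int)))
      ↔ pvPred (pvSeq ss m) (ss[k]'hk) = true := by
  rw [pvPred, decide_eq_true_eq, seq_eq ss hk, seq_eq ss hm, PySem.List.slice_to_natCast]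

lemma A_step (ss : List (List Int × Int)) (hs : pvSorted ss) (k m : Nat)
    (hk : k < ss.length) (hm : m < ss.length) :
    pvInnerF (k : Int) (pvSeq ss k)
        (pvCnt ss k + pvPart ss k m, pvUsedAt ss k m) ((m : Int), ss[m]'hm)
      = (pvCnt ss k + pvPart ss k (m + 1), pvUsedAt ss k (m + 1)) := by
  by_cases hrk : pvRecvN ss (pvSeq ss m) = some k
  · obtain ⟨hkn, hpredk, -⟩ := (recv_some_iff ss (pvSeq ss m) k).mp hrk
    have hkm : k ≠ m := by
      intro he
      subst he
      exact pred_not_le ss hs hm (le_refl k) hpredk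
    have hused : (pvUsedAt ss k m).getD m false = false := by
      rw [usedAt_get ss k m m hm, hrk]
      simp
    have hcond1 : ((k : Int) ≠ (m : Int) ∧
        PySem.List.pyGetD (pvCnt ss k + pvPart ss k m, pvUsedAt ss k m).2 ((m : Int), ss[m]'hm).1 false = false) := by
      refine ⟨by exact_mod_cast hkm, ?_⟩
      simpa [PySem.List.pyGetD_natCast] using hused
    unfold pvInnerF
    rw [if_pos hcond1, if_pos (by
      exact (cond2_iff ss k m hk hm).mpr (by simpa [seq_eq ss hk] using hpredk))]
    refine Prod.ext ?_ ?_
    · simp only []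
      rw [pvPart_succ, if_pos hrk, cnt_eq ss hm, add_assoc]
    · simp only []
      rw [PySem.List.pySetD_natCast, ← usedAt_set ss k m hrk]
  · have hpart : pvPart ss k (m + 1) = pvPart ss k m := by
      rw [pvPart_succ, if_neg hrk, add_zero]
    have hused := usedAt_succ_eq ss k m hrk
    rw [hpart, hused]
    unfold pvInnerF
    split_ifs with h1 h2
    · exfalso
      have hpredk : pvPred (pvSeq ss m) (ss[k]'hk) = true := by
        refine (cond2_iff ss k m hk hm).mp ?_
        simpa [seq_eq ss hk] using h2
      cases hr : pvRecvN ss (pvSeq ss m) with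
      | none =>
        exact absurd hpredk ((recv_none_iff ss (pvSeq ss m)).mp hr _ (List.getElem_mem hk))
      | some i0 =>
        have hle : i0 ≤ k := recv_le ss hr hk hpredk
        have hne : i0 ≠ k := by
          intro he
          exact hrk (by rw [hr, he])
        have h12 := h1.2
        rw [PySem.List.pyGetD_natCast] at h12
        rw [usedAt_get ss k m m hm, hr] at h12
        simp only [decide_eq_false_iff_not] at h12
        exact h12 (Or.inl (by omega))
    · rfl
    · rfl

lemma A_inner (ss : List (List Int × Int)) (hs : pvSorted ss) (k : Nat) (hk : k < ss.length) :
    ∀ m : Nat, m ≤ ss.length →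
      (PySem.List.enumerate (ss.drop m) (m : Int)).foldl (pvInnerF (k : Int) (pvSeq ss k))
        (pvCnt ss k + pvPart ss k m, pvUsedAt ss k m)
      = (pvCnt ss k + pvXS ss k, pvUsedAt ss k ss.length) := by
  have key : ∀ d m, m ≤ ss.length → ss.length - m = d →
      (PySem.List.enumerate (ss.drop m) (m : Int)).foldl (pvInnerF (k : Int) (pvSeq ss k))
        (pvCnt ss k + pvPart ss k m, pvUsedAt ss k m)
      = (pvCnt ss k + pvXS ss k, pvUsedAt ss k ss.length) := by
    intro d
    induction d with
    | zero =>
      intro m hm hd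
      have hmn : m = ss.length := by omega
      subst hmn
      simp [List.drop_length, PySem.List.enumerate_nil, pvXS]
    | succ d ih =>
      intro m hm hd
      have hmlt : m < ss.length := by omega
      rw [← List.getElem_cons_drop (as := ss) hmlt]
      rw [PySem.List.enumerate_cons, List.foldl_cons]
      rw [A_step ss hs k m hk hmlt]
      have hc : ((m : Int) + 1) = (((m + 1 : Nat)) : Int) := by push_cast; ring
      rw [hc]
      exact ih (m + 1) (by omega) (by omega)
  intro m hm
  exact key (ss.length - m) m hm rfl

lemma A_outer (ss : List (List Int × Int)) (hs : pvSorted ss) :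
    ∀ k : Nat, k ≤ ss.length →
      ((PySem.List.enumerate (ss.drop k) (k : Int)).foldl (pvOuterF ss)
        (pvMergedAt ss k, pvUsedAt ss k 0))
      = (pvMergedAt ss ss.length, pvUsedAt ss ss.length 0) := by
  have roll : ∀ k : Nat, pvUsedAt ss k ss.length = pvUsedAt ss (k + 1) 0 := by
    intro k
    simp only [pvUsedAt]
    refine List.map_congr_left (fun j hj => ?_)
    have hjn : j < ss.length := List.mem_range.mp hj
    cases hr : pvRecvN ss (pvSeq ss j) with
    | none => rfl
    | some i' =>
      simp only []
      congr 1
      simp only [eq_iff_iff]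
      constructor
      · rintro (h1 | h2)
        · exact Or.inl (by omega)
        · exact Or.inl (by omega)
      · rintro (h1 | h2)
        · rcases Nat.lt_succ_iff_lt_or_eq.mp h1 with h3 | h3
          · exact Or.inl h3
          · exact Or.inr ⟨h3, hjn⟩
        · exact absurd h2.2 (by omega)
  have step : ∀ k : Nat, (hk : k < ss.length) →
      pvOuterF ss (pvMergedAt ss k, pvUsedAt ss k 0) ((k : Int), ss[k]'hk)
        = (pvMergedAt ss (k + 1), pvUsedAt ss (k + 1) 0) := by
    intro k hk
    unfold pvOuterF
    have hcond : PySem.List.pyGetD (pvMergedAt ss k, pvUsedAt ss k 0).2 ((k : Int), ss[k]'hk).1 false = false := by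
      simpa [PySem.List.pyGetD_natCast] using usedAt_self ss hs k hk
    rw [hcond]
    simp only [Bool.false_eq_true, if_false]
    have hinner := A_inner ss hs k hk 0 (Nat.zero_le _)
    have h0 : pvPart ss k 0 = 0 := by simp [pvPart]
    rw [h0, add_zero] at hinner
    simp only [List.drop_zero, Nat.cast_zero] at hinner
    have hin2 : (PySem.List.enumerate ss 0).foldl (pvInnerF (k : Int) ((ss[k]'hk).1))
        (((k : Int), ss[k]'hk).2.2, pvUsedAt ss k 0)
        = (pvCnt ss k + pvXS ss k, pvUsedAt ss k ss.length) := by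
      rw [← seq_eq ss hk, ← cnt_eq ss hk] at *
      exact hinner
    rw [hin2]
    refine Prod.ext ?_ ?_
    · simp only [pvMergedAt, List.range_succ, List.map_append, List.map_cons, List.map_nil]
      rw [seq_eq ss hk]
    · simp only []
      exact roll k
  have key : ∀ d k, k ≤ ss.length → ss.length - k = d →
      ((PySem.List.enumerate (ss.drop k) (k : Int)).foldl (pvOuterF ss)
        (pvMergedAt ss k, pvUsedAt ss k 0))
      = (pvMergedAt ss ss.length, pvUsedAt ss ss.length 0) := by
    intro d
    induction d with
    | zero =>
      intro k hk hd
      have hkn : k = ss.length := by omega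
      subst hkn
      simp [List.drop_length, PySem.List.enumerate_nil]
    | succ d ih =>
      intro k hk hd
      have hklt : k < ss.length := by omega
      rw [← List.getElem_cons_drop (as := ss) hklt]
      rw [PySem.List.enumerate_cons, List.foldl_cons]
      rw [step k hklt]
      have hc : ((k : Int) + 1) = (((k + 1 : Nat)) : Int) := by push_cast; ring
      rw [hc]
      exact ih (k + 1) (by omega) (by omega)
  intro k hk
  exact key (ss.length - k) k hk rfl

lemma A_closed (ss : List (List Int × Int)) (hs : pvSorted ss) :
    ((PySem.List.enumerate ss 0).foldl (pvOuterF ss)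
      (([] : List (List Int × Int)), List.replicate ss.length false)).1
    = pvMergedAt ss ss.length := by
  have hu0 : List.replicate ss.length false = pvUsedAt ss 0 0 := by
    symm
    rw [List.eq_replicate_iff]
    constructor
    · simp [pvUsedAt]
    · intro b hb
      simp only [pvUsedAt, List.mem_map] at hb
      obtain ⟨j, -, hbj⟩ := hb
      cases hr : pvRecvN ss (pvSeq ss j) with
      | none => rw [hr] at hbj; exact hbj.symm
      | some i' =>
        rw [hr] at hbj
        simp only [] at hbj
        rw [← hbj]
        simp
  have hm0 : ([] : List (List Int × Int)) = pvMergedAt ss 0 := by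
    simp [pvMergedAt]
  rw [hu0, hm0]
  have := A_outer ss hs 0 (Nat.zero_le _)
  simp only [List.drop_zero, Nat.cast_zero] at this
  rw [this]

-- B side ------------------------------------------------------------------

lemma fp_get_aux (key : List Int) :
    ∀ (suf : List (List Int × Int)) (k : Nat) (d : PySem.Dict (List Int) Int),
      ((PySem.List.enumerate suf (k : Int)).foldl pvSetdF d).get? key
        = (d.get? key).or ((suf.findIdx? (fun q => q.1 == key)).map
            (fun t => ((k + t : Nat) : Int))) := by
  intro suf
  induction suf with
  | nil =>
    intro k d
    simp [PySem.List.enumerate_nil, List.findIdx?_nil]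
  | cons x rest ih =>
    intro k d
    rw [PySem.List.enumerate_cons, List.foldl_cons]
    have hc : ((k : Int) + 1) = (((k + 1 : Nat)) : Int) := by push_cast; ring
    rw [hc, ih (k + 1) (pvSetdF d ((k : Int), x))]
    rw [List.findIdx?_cons]
    by_cases hx : x.1 == key
    · have hxe : x.1 = key := eq_of_beq hx
      rw [if_pos hx]
      have hsd : (pvSetdF d ((k : Int), x)).get? key = some ((d.get? key).getD (k : Int)) := by
        simp only [pvSetdF]
        rw [hxe]
        exact PySem.Dict.get?_setdefault_self d key (k : Int)
      rw [hsd]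
      cases hdk : d.get? key with
      | none => simp
      | some v => simp
    · rw [if_neg hx]
      have hne : key ≠ x.1 := fun he => hx (by simp [he])
      have hsd : (pvSetdF d ((k : Int), x)).get? key = d.get? key := by
        simp only [pvSetdF]
        exact PySem.Dict.get?_setdefault_of_ne _ _ hne
      rw [hsd]
      congr 1
      cases hfi : List.findIdx? (fun q => q.1 == key) rest with
      | none => rfl
      | some t =>
        simp only [Option.map_some]
        congr 1
        omega

lemma fp_get (ss : List (List Int × Int)) (key : List Int) :
    (pvFP ss).get? key = (ss.findIdx? (fun q => q.1 == key)).map (fun t => (t : Int)) := by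
  have h := fp_get_aux key ss 0 PySem.Dict.empty
  rw [Nat.cast_zero] at h
  rw [pvFP, h]
  cases hf : List.findIdx? (fun q => q.1 == key) ss <;>
    simp [PySem.Dict.get?_empty]

-- a position hit by the key "take L of s" (3 ≤ L < |s|) satisfies pvPred
lemma hit_pred (ss : List (List Int × Int)) {s : List Int} {L t : Nat}
    (hLlt : L < s.length) (ht : t < ss.length) (he : (ss[t]'ht).1 = s.take L) :
    pvPred s (ss[t]'ht) = true := by
  rw [pvPred, decide_eq_true_eq]
  have hlen : (ss[t]'ht).1.length = L := by
    rw [he, List.length_take]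
    omega
  rw [hlen]
  exact ⟨hLlt, by rw [he]⟩

-- if the dict misses every guarded key in the list, the scan returns none
lemma findRecv_none_of (d : PySem.Dict (List Int) Int) (s : List Int) :
    ∀ lst : List Int,
      (∀ L ∈ lst, L < (s.length : Int) → d.get? (PySem.List.slice s none (some L)) = none) →
      pvFindRecv d s lst = none := by
  intro lst
  induction lst with
  | nil => intro _; rfl
  | cons L rest ih =>
    intro h
    by_cases hg : L < (s.length : Int)
    · have h1 := h L List.mem_cons_self hg
      simp only [pvFindRecv, if_pos hg, h1]
      exact ih (fun L' hL' => h L' (List.mem_cons_of_mem _ hL'))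
    · simp only [pvFindRecv, if_neg hg]
      exact ih (fun L' hL' => h L' (List.mem_cons_of_mem _ hL'))

-- walking a strictly descending list that contains LsZ, missing every guarded key above LsZ,
-- ends on the hit at LsZ
lemma findRecv_walk (d : PySem.Dict (List Int) Int) (s : List Int) (LsZ : Int) (v : Int)
    (hguard : LsZ < (s.length : Int))
    (hhit : d.get? (PySem.List.slice s none (some LsZ)) = some v) :
    ∀ lst : List Int, lst.Pairwise (· > ·) → LsZ ∈ lst →
      (∀ L ∈ lst, LsZ < L → L < (s.length : Int) →
        d.get? (PySem.List.slice s none (some L)) = none) →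
      pvFindRecv d s lst = some v := by
  intro lst
  induction lst with
  | nil => intro _ hmem _; exact absurd hmem (List.not_mem_nil)
  | cons L rest ih =>
    intro hpw hmem hmiss
    rcases List.mem_cons.mp hmem with rfl | hmem'
    · simp only [pvFindRecv, if_pos hguard, hhit]
    · have hgt : LsZ < L := (List.pairwise_cons.mp hpw).1 LsZ hmem'
      have htail := ih (List.pairwise_cons.mp hpw).2 hmem'
        (fun L' hL' => hmiss L' (List.mem_cons_of_mem _ hL'))
      by_cases hg : L < (s.length : Int)
      · have h1 := hmiss L List.mem_cons_self hgt hg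
        simp only [pvFindRecv, if_pos hg, h1]
        exact htail
      · simp only [pvFindRecv, if_neg hg]
        exact htail

lemma pvLens_desc (ss : List (List Int × Int)) : (pvLens ss).Pairwise (· > ·) := by
  unfold pvLens
  have h1 : (PySem.List.sorted (PySem.Set.ofList (ss.map (fun p => (p.1.length : Int))))
      (fun x => x) true).Pairwise (fun a b : Int => b ≤ a) :=
    PySem.List.sorted_pairwise_rev (xs := PySem.Set.ofList (ss.map (fun p => (p.1.length : Int))))
      (key := fun x => x)
  have h2 : (PySem.List.sorted (PySem.Set.ofList (ss.map (fun p => (p.1.length : Int))))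
      (fun x => x) true).Nodup := by
    have hperm := PySem.List.sorted_perm
      (PySem.Set.ofList (ss.map (fun p => (p.1.length : Int)))) (fun x : Int => x) true
    exact (hperm.nodup_iff).mpr (PySem.Set.nodup_ofList _)

  have h12 := h1.and h2
  exact h12.imp (fun {a b} hab => lt_of_le_of_ne hab.1 (fun he => hab.2 (by omega)))

lemma mem_pvLens (ss : List (List Int × Int)) {t : Nat} (ht : t < ss.length) :
    ((ss[t]'ht).1.length : Int) ∈ pvLens ss := by
  rw [pvLens, PySem.List.mem_sorted]
  rw [PySem.Set.mem_ofList]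
  exact List.mem_map.mpr ⟨ss[t]'ht, List.getElem_mem ht, rfl⟩

lemma findRecv_eq (ss : List (List Int × Int)) (hs : pvSorted ss) (h3 : pvLen3 ss)
    (s : List Int) :
    pvFindRecv (pvFP ss) s (pvLens ss)
      = (pvRecvN ss s).map (fun i => (i : Int)) := by
  cases hr : pvRecvN ss s with
  | none =>
    have hnone := (recv_none_iff ss s).mp hr
    have hmain : pvFindRecv (pvFP ss) s (pvLens ss) = none := by
      refine findRecv_none_of (pvFP ss) s _ (fun L hL hg => ?_)
      have hL0 : 0 ≤ L := by
        rw [pvLens, PySem.List.mem_sorted, PySem.Set.mem_ofList] at hL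
        obtain ⟨p, -, hp⟩ := List.mem_map.mp hL
        omega
      rw [PySem.List.slice_to s hL0, fp_get]
      cases hf : ss.findIdx? (fun q => q.1 == s.take L.toNat) with
      | none => rfl
      | some t =>
        exfalso
        obtain ⟨ht, hbeq, -⟩ := List.findIdx?_eq_some_iff_getElem.mp hf
        have he : (ss[t]'ht).1 = s.take L.toNat := by simpa using hbeq
        exact hnone _ (List.getElem_mem ht) (hit_pred ss (by omega) ht he)
    rw [hmain]
    rfl
  | some i =>
    obtain ⟨hin, hpred, hmin⟩ := (recv_some_iff ss s i).mp hr
    rw [pvPred, decide_eq_true_eq] at hpred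
    obtain ⟨hLs, hTake⟩ := hpred
    set Ls : Nat := (ss[i]'hin).1.length with hLsdef
    have hLs3 : 3 ≤ Ls := by
      have := h3 i hin
      rwa [seq_eq ss hin] at this
    -- the dict hits take Ls at exactly i
    have hhit : (pvFP ss).get? (s.take Ls) = some (i : Int) := by
      rw [fp_get]
      have : ss.findIdx? (fun q => q.1 == s.take Ls) = some i := by
        rw [List.findIdx?_eq_some_iff_getElem]
        refine ⟨hin, by simpa using hTake, fun t htlt => ?_⟩
        simp only [beq_iff_eq]
        intro he
        exact absurd (hit_pred ss hLs (by omega) he) (hmin t htlt)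
      rw [this]
      rfl
    -- every longer candidate misses
    have hmiss : ∀ L ∈ pvLens ss, (Ls : Int) < L → L < (s.length : Int) →
        (pvFP ss).get? (PySem.List.slice s none (some L)) = none := by
      intro L _ hLl hLu
      rw [PySem.List.slice_to s (by omega), fp_get]
      cases hf : ss.findIdx? (fun q => q.1 == s.take L.toNat) with
      | none => rfl
      | some t =>
        exfalso
        obtain ⟨ht, hbeq, -⟩ := List.findIdx?_eq_some_iff_getElem.mp hf
        have he : (ss[t]'ht).1 = s.take L.toNat := by simpa using hbeq
        have hpt := hit_pred ss (s := s) (L := L.toNat) (by omega) ht he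
        have hle : i ≤ t := recv_le ss hr ht hpt
        have hlen : (ss[t]'ht).1.length = L.toNat := by
          rw [he, List.length_take]; omega
        have := hs i t hle ht
        rw [seq_eq ss ht, seq_eq ss hin] at this
        omega
    have hhit' : (pvFP ss).get? (PySem.List.slice s none (some (Ls : Int))) = some (i : Int) := by
      rw [PySem.List.slice_to s (by omega)]
      have hcast : ((Ls : Int)).toNat = Ls := by omega
      rw [hcast, hhit]
    rw [findRecv_walk (pvFP ss) s (Ls : Int) (i : Int) (by exact_mod_cast hLs) hhit'
      (pvLens ss) (pvLens_desc ss) (mem_pvLens ss hin) hmiss]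
    rfl

lemma B_extra (ss : List (List Int × Int)) (hs : pvSorted ss) (h3 : pvLen3 ss) :
    ∀ k : Nat, k ≤ ss.length →
      (ss.drop k).foldl (pvExtraF (pvFP ss) (pvLens ss)) (pvExtraAt ss k) = pvExtraAt ss ss.length := by
  have extra_get : ∀ (m i : Nat), i < ss.length → (pvExtraAt ss m).getD i 0 = pvPart ss i m := by
    intro m i hi
    have hi' : i < (pvExtraAt ss m).length := by simp [pvExtraAt, hi]
    rw [List.getD_eq_getElem _ _ hi']
    simp [pvExtraAt]
  have step : ∀ k : Nat, (hk : k < ss.length) →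
      pvExtraF (pvFP ss) (pvLens ss) (pvExtraAt ss k) (ss[k]'hk) = pvExtraAt ss (k + 1) := by
    intro k hk
    unfold pvExtraF
    rw [show (ss[k]'hk).1 = pvSeq ss k from (seq_eq ss hk).symm]
    rw [findRecv_eq ss hs h3 (pvSeq ss k)]
    cases hr : pvRecvN ss (pvSeq ss k) with
    | none =>
      show pvExtraAt ss k = pvExtraAt ss (k + 1)
      simp only [pvExtraAt]
      refine List.map_congr_left (fun i hi => ?_)
      rw [pvPart_succ, if_neg (by simp [hr]), add_zero]
    | some i =>
      obtain ⟨hiln, -, -⟩ := (recv_some_iff ss (pvSeq ss k) i).mp hr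
      show PySem.List.pySetD (pvExtraAt ss k) (i : Int)
          (PySem.List.pyGetD (pvExtraAt ss k) (i : Int) 0 + (ss[k]'hk).2) = pvExtraAt ss (k + 1)
      rw [PySem.List.pySetD_natCast, PySem.List.pyGetD_natCast]
      rw [extra_get k i hiln]
      apply List.ext_getElem
      · simp [pvExtraAt]
      · intro j hj1 hj2
        have hjn : j < ss.length := by simpa [pvExtraAt] using hj2
        rw [List.getElem_set]
        simp only [pvExtraAt, List.getElem_map, List.getElem_range]
        by_cases hij : i = j
        · subst hij
          rw [if_pos rfl, pvPart_succ, if_pos hr, cnt_eq ss hk]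
        · rw [if_neg hij, pvPart_succ, if_neg (by
            intro he
            rw [hr] at he
            exact hij (Option.some.inj he)), add_zero]
  have key : ∀ d k, k ≤ ss.length → ss.length - k = d →
      (ss.drop k).foldl (pvExtraF (pvFP ss) (pvLens ss)) (pvExtraAt ss k) = pvExtraAt ss ss.length := by
    intro d
    induction d with
    | zero =>
      intro k hk hd
      have hkn : k = ss.length := by omega
      subst hkn
      simp [List.drop_length]
    | succ d ih =>
      intro k hk hd
      have hklt : k < ss.length := by omega
      rw [← List.getElem_cons_drop (as := ss) hklt, List.foldl_cons, step k hklt]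
      exact ih (k + 1) (by omega) (by omega)
  intro k hk
  exact key (ss.length - k) k hk rfl

lemma B_closed (ss : List (List Int × Int)) (hs : pvSorted ss) (h3 : pvLen3 ss) :
    ((ss.zip (ss.foldl (pvExtraF (pvFP ss) (pvLens ss)) (List.replicate ss.length (0 : Int)))).map
      (fun p => (p.1.1, p.1.2 + p.2)))
    = pvMergedAt ss ss.length := by
  have he0 : List.replicate ss.length (0 : Int) = pvExtraAt ss 0 := by
    symm
    rw [List.eq_replicate_iff]
    constructor
    · simp [pvExtraAt]
    · intro b hb
      simp only [pvExtraAt, List.mem_map] at hb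
      obtain ⟨j, -, hbj⟩ := hb
      rw [← hbj]
      simp [pvPart]
  rw [he0]
  have hfold := B_extra ss hs h3 0 (Nat.zero_le _)
  rw [List.drop_zero] at hfold
  rw [hfold]
  apply List.ext_getElem
  · simp [pvExtraAt, pvMergedAt]
  · intro i hi1 hi2
    have hin : i < ss.length := by
      simpa [pvExtraAt, pvMergedAt] using hi2
    simp only [List.getElem_map, List.getElem_zip, pvMergedAt, List.getElem_range]
    rw [seq_eq ss hin, cnt_eq ss hin]
    congr 1
    simp only [pvExtraAt, List.getElem_map, List.getElem_range, pvXS]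

-- ===== VERDICT (by name: the statement is the Claim_ definition above) =====
theorem merge_subsequences_spec : Claim_equal_merge_subsequences := by
  intro xs _
  unfold Spec_merge_subsequences
  rw [A_bridge, B_bridge, A_closed (pvSS xs) (pvSS_sorted xs),
    B_closed (pvSS xs) (pvSS_sorted xs) (pvSS_len3 xs)]
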